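-- pv_equiv track=rewrite | github.com/lairdm/islandviewer-ui | webui/utils/formatter.py | makeAnnotationGroupingStr
-- ===== SOURCE A (Python) =====
-- def makeAnnotationGroupingStr(annotationstr):
--
--     if not annotationstr:
--         return ''
--
--     annotations = annotationstr.split(',')
--
--     virulence = []
--     resistance = []
--     pathogen = []
--     for annotation in annotations:
--         if annotation in ['VFDB', 'Victors', 'PATRIC_VF', 'BLAST']:
--             virulence.append(annotation)
--         elif annotation in ['RGI', 'CARD']:
--             resistance.append(annotation)
--         elif annotation in ['PAG']:
--             pathogen.append(annotation)
--
--     annotation_pieces = []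
--
--     if virulence:
--         annotation_pieces.append('Virulence gene(' + ','.join(virulence) + ')')
--     if resistance:
--         annotation_pieces.append('Resistance gene(' + ','.join(resistance) + ')')
--     if pathogen:
--         annotation_pieces.append('Pathogen-associated gene(' + ','.join(pathogen) + ')')
--
--     return ','.join(annotation_pieces)
-- ===== SOURCE B (Python) =====
-- GROUPS = [
--     ('Virulence gene', ('VFDB', 'Victors', 'PATRIC_VF', 'BLAST')),
--     ('Resistance gene', ('RGI', 'CARD')),
--     ('Pathogen-associated gene', ('PAG',)),
-- ]
--
-- def makeAnnotationGroupingStr(annotationstr):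
--     if not annotationstr:
--         return ''
--     annotations = annotationstr.split(',')
--     pieces = []
--     for label, members in GROUPS:
--         matched = [a for a in annotations if a in members]
--         if matched:
--             pieces.append(label + '(' + ','.join(matched) + ')')
--     return ','.join(pieces)
-- ===== Notes on version B (the rewrite author's own statement) =====
-- stated objective: simpler
-- what changed: Replaced the single-pass if/elif bucketing into three accumulator lists with a table-driven loop over (label, members) groups that scans the annotation list once per category and emits each piece directly.
import Mathlib
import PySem

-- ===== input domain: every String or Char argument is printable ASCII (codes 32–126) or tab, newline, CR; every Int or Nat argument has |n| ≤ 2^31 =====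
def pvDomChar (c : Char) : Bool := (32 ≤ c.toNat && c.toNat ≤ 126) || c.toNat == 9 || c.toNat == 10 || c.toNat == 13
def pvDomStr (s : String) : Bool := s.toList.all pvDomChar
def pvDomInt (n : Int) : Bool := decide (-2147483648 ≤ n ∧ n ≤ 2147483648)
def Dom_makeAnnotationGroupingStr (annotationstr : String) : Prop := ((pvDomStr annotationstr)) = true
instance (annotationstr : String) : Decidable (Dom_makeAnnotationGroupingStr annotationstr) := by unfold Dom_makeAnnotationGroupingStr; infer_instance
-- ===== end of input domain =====

-- B replaces A's single-pass if/elif bucketing with a table-driven loop over labeled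
-- category groups, scanning the annotation list once per category (objective: simpler).

-- ===== PORT A =====
def makeAnnotationGroupingStr (annotationstr : String) : String :=
  if annotationstr = "" then "" else
  let annotations : List String := (PySem.Str.split? annotationstr ",").getD []
  -- state (virulence, resistance, pathogen), each appended to as A's loop runs
  let st := annotations.foldl
    (fun (st : List String × List String × List String) annotation =>
      if annotation ∈ ["VFDB", "Victors", "PATRIC_VF", "BLAST"] then
        (st.1 ++ [annotation], st.2.1, st.2.2)
      else if annotation ∈ ["RGI", "CARD"] then
        (st.1, st.2.1 ++ [annotation], st.2.2)
      else if annotation ∈ ["PAG"] then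
        (st.1, st.2.1, st.2.2 ++ [annotation])
      else st)
    ([], [], [])
  let pieces : List String := []
  let pieces := if st.1 ≠ [] then pieces ++ ["Virulence gene(" ++ PySem.Str.join "," st.1 ++ ")"] else pieces
  let pieces := if st.2.1 ≠ [] then pieces ++ ["Resistance gene(" ++ PySem.Str.join "," st.2.1 ++ ")"] else pieces
  let pieces := if st.2.2 ≠ [] then pieces ++ ["Pathogen-associated gene(" ++ PySem.Str.join "," st.2.2 ++ ")"] else pieces
  PySem.Str.join "," pieces

-- ===== PORT B =====
def pvGroups : List (String × List String) :=
  [("Virulence gene", ["VFDB", "Victors", "PATRIC_VF", "BLAST"]),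
   ("Resistance gene", ["RGI", "CARD"]),
   ("Pathogen-associated gene", ["PAG"])]

def makeAnnotationGroupingStr_alt (annotationstr : String) : String :=
  if annotationstr = "" then "" else
  let annotations : List String := (PySem.Str.split? annotationstr ",").getD []
  let pieces := pvGroups.foldl
    (fun (acc : List String) g =>
      let matched := annotations.filter (fun a => a ∈ g.2)
      if matched ≠ [] then acc ++ [g.1 ++ "(" ++ PySem.Str.join "," matched ++ ")"] else acc)
    []
  PySem.Str.join "," pieces

-- ===== PRECONDITION & SPEC =====
def Spec_makeAnnotationGroupingStr (annotationstr : String) (out : String) : Prop := out = makeAnnotationGroupingStr_alt annotationstr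
instance (annotationstr : String) (out : String) : Decidable (Spec_makeAnnotationGroupingStr annotationstr out) := by unfold Spec_makeAnnotationGroupingStr; infer_instance

-- ===== CLAIM (what is proved, stated in full; the proofs are below) =====
def Claim_equal_makeAnnotationGroupingStr : Prop := ∀ (annotationstr : String), Dom_makeAnnotationGroupingStr annotationstr → Spec_makeAnnotationGroupingStr annotationstr (makeAnnotationGroupingStr annotationstr)

-- ===== LEMMAS AND PROOFS =====

-- A's single pass builds exactly the three per-category filters (the elif guards never
-- fire on an element of an earlier category because the member lists are disjoint).
theorem pvBucket_eq (xs v r p : List String) :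
    xs.foldl
      (fun (st : List String × List String × List String) annotation =>
        if annotation ∈ ["VFDB", "Victors", "PATRIC_VF", "BLAST"] then
          (st.1 ++ [annotation], st.2.1, st.2.2)
        else if annotation ∈ ["RGI", "CARD"] then
          (st.1, st.2.1 ++ [annotation], st.2.2)
        else if annotation ∈ ["PAG"] then
          (st.1, st.2.1, st.2.2 ++ [annotation])
        else st)
      (v, r, p)
    = (v ++ xs.filter (fun a => a ∈ ["VFDB", "Victors", "PATRIC_VF", "BLAST"]),
       r ++ xs.filter (fun a => a ∈ ["RGI", "CARD"]),
       p ++ xs.filter (fun a => a ∈ ["PAG"])) := by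
  induction xs generalizing v r p with
  | nil => simp
  | cons a t ih =>
    by_cases h1 : a ∈ (["VFDB", "Victors", "PATRIC_VF", "BLAST"] : List String)
    · have h2 : a ∉ (["RGI", "CARD"] : List String) := by
        simp only [List.mem_cons, List.not_mem_nil, or_false] at h1 ⊢
        rcases h1 with h | h | h | h <;> subst h <;> decide
      have h3 : a ∉ (["PAG"] : List String) := by
        simp only [List.mem_cons, List.not_mem_nil, or_false] at h1 ⊢
        rcases h1 with h | h | h | h <;> subst h <;> decide
      rw [List.foldl_cons, if_pos h1, ih]
      simp only [List.filter_cons, decide_eq_true h1, decide_eq_false h2, decide_eq_false h3]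
      simp
    · by_cases h2 : a ∈ (["RGI", "CARD"] : List String)
      · have h3 : a ∉ (["PAG"] : List String) := by
          simp only [List.mem_cons, List.not_mem_nil, or_false] at h2 ⊢
          rcases h2 with h | h <;> subst h <;> decide
        rw [List.foldl_cons, if_neg h1, if_pos h2, ih]
        simp only [List.filter_cons, decide_eq_false h1, decide_eq_true h2, decide_eq_false h3]
        simp
      · by_cases h3 : a ∈ (["PAG"] : List String)
        · rw [List.foldl_cons, if_neg h1, if_neg h2, if_pos h3, ih]
          simp only [List.filter_cons, decide_eq_false h1, decide_eq_false h2, decide_eq_true h3]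
          simp
        · rw [List.foldl_cons, if_neg h1, if_neg h2, if_neg h3, ih]
          simp only [List.filter_cons, decide_eq_false h1, decide_eq_false h2, decide_eq_false h3]
          simp

-- ===== VERDICT (by name: the statement is the Claim_ definition above) =====
theorem makeAnnotationGroupingStr_spec : Claim_equal_makeAnnotationGroupingStr := by
  intro s _
  unfold Spec_makeAnnotationGroupingStr makeAnnotationGroupingStr makeAnnotationGroupingStr_alt
  by_cases hs : s = ""
  · simp [hs]
  · simp only [hs, ite_false, pvGroups, List.foldl_cons, List.foldl_nil,
      pvBucket_eq, List.nil_append]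
    split_ifs <;> rfl
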